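-- pv_equiv track=rewrite | github.com/enmag/F3 | ta_benchmarks/false_mtl/critical_region/generate_critical.py | _instantiate_property
-- ===== SOURCE A (Python) =====
-- def _instantiate_property(template, proc_num):
--     mut_excl = []
--     for i0 in range(proc_num):
--         curr = " or ".join(f"PC{i1}.critical" for i1 in range(proc_num)
--                            if i1 != i0)
--         curr = f"(PC{i0}.critical imply not ({curr}))"
--         mut_excl.append(curr)
--     return template.format(mut_excl=" and ".join(mut_excl))
-- ===== SOURCE B (Python) =====
-- def _instantiate_property(template, proc_num):
--     # prefix/suffix accumulation ("join of all terms except i" computed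
--     # product-except-self style): pre[i] = " or "-join of terms[:i],
--     # suf[i] = " or "-join of terms[i:]; no per-clause join is performed.
--     pre = [""]
--     for i in range(proc_num):
--         t = "PC%d.critical" % i
--         pre.append(t if i == 0 else pre[-1] + " or " + t)
--     suf = [""]
--     for i in range(proc_num - 1, -1, -1):
--         t = "PC%d.critical" % i
--         suf.append(t if i == proc_num - 1 else t + " or " + suf[-1])
--     suf.reverse()
--     clauses = []
--     for i0, (left, right) in enumerate(zip(pre, suf[1:])):
--         inner = left + " or " + right if (left and right) else left + right
--         clauses.append("(PC%d.critical imply not (%s))" % (i0, inner))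
--     return template.format(mut_excl=" and ".join(clauses))
-- ===== Notes on version B (the rewrite author's own statement) =====
-- stated objective: alternative
-- what changed: B replaces A's per-clause filtered join (regenerating and joining all other atoms for every i0) by prefix/suffix join accumulation, product-except-self style: two linear passes build pre[i] = ' or '.join(terms[:i]) and suf[i] = ' or '.join(terms[i:]), and each clause is formed by gluing pre[i0] and suf[i0+1] with a single ' or ' when both are nonempty.
import Mathlib
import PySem

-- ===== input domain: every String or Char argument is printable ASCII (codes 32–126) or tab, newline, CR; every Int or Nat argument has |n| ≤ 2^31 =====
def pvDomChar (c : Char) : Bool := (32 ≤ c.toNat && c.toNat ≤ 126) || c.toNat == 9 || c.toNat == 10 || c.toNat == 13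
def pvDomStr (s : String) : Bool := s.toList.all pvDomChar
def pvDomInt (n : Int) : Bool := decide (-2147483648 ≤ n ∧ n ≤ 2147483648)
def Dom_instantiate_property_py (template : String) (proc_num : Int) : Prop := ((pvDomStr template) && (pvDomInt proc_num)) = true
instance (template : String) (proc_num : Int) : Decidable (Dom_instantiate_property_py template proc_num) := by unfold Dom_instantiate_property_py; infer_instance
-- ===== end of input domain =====

-- B replaces A's per-clause filtered join by prefix/suffix join accumulation
-- (product-except-self style): two linear passes build pre[i] = join(terms[:i])
-- and suf[i] = join(terms[i:]), each clause glues pre[i] and suf[i+1]; equivalence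
-- of the RETURN value is proved on templates whose only replacement fields are
-- '{mut_excl}' (Pre_ below).

-- Shared transliteration of the builtin template.format(mut_excl=v) for templates
-- admitted by Pre_: '{{' -> '{', '}}' -> '}', '{mut_excl}' -> v; exact there
-- (other fields make Python raise or are excluded by Pre_).
def pyFormatME (v : List Char) : List Char → List Char
  | '{' :: '{' :: rest => '{' :: pyFormatME v rest
  | '}' :: '}' :: rest => '}' :: pyFormatME v rest
  | '{' :: 'm' :: 'u' :: 't' :: '_' :: 'e' :: 'x' :: 'c' :: 'l' :: '}' :: rest => v ++ pyFormatME v rest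
  | c :: rest => c :: pyFormatME v rest
  | [] => []

-- ===== PORT A =====
def instantiate_property_py (template : String) (proc_num : Int) : String :=
  let mut_excl : List (List Char) :=
    (PySem.List.pyRange 0 proc_num 1).foldl (fun acc i0 =>
      let curr := PySem.Chars.join " or ".toList
        (((PySem.List.pyRange 0 proc_num 1).filter (fun i1 => i1 != i0)).map
          (fun i1 => "PC".toList ++ PySem.Int.toChars i1 ++ ".critical".toList))
      acc ++ ["(PC".toList ++ PySem.Int.toChars i0 ++ ".critical imply not (".toList
              ++ curr ++ "))".toList]) []
  String.ofList (pyFormatME (PySem.Chars.join " and ".toList mut_excl) template.toList)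

-- ===== PORT B =====
def instantiate_property_py_alt (template : String) (proc_num : Int) : String :=
  let pre : List (List Char) :=
    (PySem.List.pyRange 0 proc_num 1).foldl (fun acc i =>
      let t := "PC".toList ++ PySem.Int.toChars i ++ ".critical".toList
      acc ++ [if i == 0 then t else acc.getLast! ++ " or ".toList ++ t]) [[]]
  let suf0 : List (List Char) :=
    (PySem.List.pyRange (proc_num - 1) (-1) (-1)).foldl (fun acc i =>
      let t := "PC".toList ++ PySem.Int.toChars i ++ ".critical".toList
      acc ++ [if i == proc_num - 1 then t else t ++ " or ".toList ++ acc.getLast!]) [[]]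
  let suf := suf0.reverse
  let clauses : List (List Char) :=
    (PySem.List.enumerate (List.zip pre (PySem.List.slice suf (some 1) none))).foldl
      (fun acc p =>
        let inner := if !p.2.1.isEmpty && !p.2.2.isEmpty
                     then p.2.1 ++ " or ".toList ++ p.2.2 else p.2.1 ++ p.2.2
        acc ++ ["(PC".toList ++ PySem.Int.toChars p.1 ++ ".critical imply not (".toList
                ++ inner ++ "))".toList]) []
  String.ofList (pyFormatME (PySem.Chars.join " and ".toList clauses) template.toList)

-- ===== PRECONDITION & SPEC =====
-- Pre_: a GRAMMAR (shape) condition on the template string, checked left to right: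
-- every '{'/'}' belongs to one of the three literal blocks '{{', '}}', '{mut_excl}'
-- (it classifies the input only; it computes no output and copies neither port).
-- Stray braces or other field names make A (and B) raise ValueError/KeyError;
-- fields with a conversion or format spec such as '{mut_excl!r}' return in both
-- Pythons but are excluded because the ports model only the plain field (see cites).
def fmtOkME : List Char → Bool
  | [] => true
  | '{' :: '{' :: rest => fmtOkME rest
  | '}' :: '}' :: rest => fmtOkME rest
  | '{' :: 'm' :: 'u' :: 't' :: '_' :: 'e' :: 'x' :: 'c' :: 'l' :: '}' :: rest => fmtOkME rest
  | '{' :: _ => false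
  | '}' :: _ => false
  | _ :: rest => fmtOkME rest

def Pre_instantiate_property_py (template : String) (proc_num : Int) : Prop :=
  fmtOkME template.toList = true
instance (template : String) (proc_num : Int) : Decidable (Pre_instantiate_property_py template proc_num) := by unfold Pre_instantiate_property_py; infer_instance

def pvWitness_instantiate_property_py : String × Int := ("always ({mut_excl})", 3)

def Spec_instantiate_property_py (template : String) (proc_num : Int) (out : String) : Prop := out = instantiate_property_py_alt template proc_num
instance (template : String) (proc_num : Int) (out : String) : Decidable (Spec_instantiate_property_py template proc_num out) := by unfold Spec_instantiate_property_py; infer_instance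

-- ===== CLAIM (what is proved, stated in full; the proofs are below) =====
def Claim_equal_instantiate_property_py : Prop := ∀ (template : String) (proc_num : Int), Dom_instantiate_property_py template proc_num → Pre_instantiate_property_py template proc_num → Spec_instantiate_property_py template proc_num (instantiate_property_py template proc_num)

-- ===== LEMMAS AND PROOFS =====

-- the atom string "PC{i}.critical"
def pvTerm (i : Int) : List Char := "PC".toList ++ PySem.Int.toChars i ++ ".critical".toList
-- " or "-joins of a prefix resp. suffix of the atom table
def pvP (i : Int) : List Char :=
  PySem.Chars.join " or ".toList ((PySem.List.pyRange 0 i 1).map pvTerm)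
def pvS (n i : Int) : List Char :=
  PySem.Chars.join " or ".toList ((PySem.List.pyRange i n 1).map pvTerm)

theorem join_cons (sep p : List Char) (rest : List (List Char)) (h : rest ≠ []) :
    PySem.Chars.join sep (p :: rest) = p ++ sep ++ PySem.Chars.join sep rest := by
  cases rest with
  | nil => exact absurd rfl h
  | cons q r => exact PySem.Chars.join_cons_cons sep p q r

theorem join_append (sep : List Char) (xs ys : List (List Char)) (hx : xs ≠ []) (hy : ys ≠ []) :
    PySem.Chars.join sep (xs ++ ys) = PySem.Chars.join sep xs ++ sep ++ PySem.Chars.join sep ys := by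
  induction xs with
  | nil => exact absurd rfl hx
  | cons a as ih =>
    cases as with
    | nil => simp [join_cons sep a ys hy, PySem.Chars.join_singleton]
    | cons b bs =>
      have h1 : ((a :: b :: bs) ++ ys) = a :: ((b :: bs) ++ ys) := rfl
      rw [h1, join_cons sep a _ (by simp), ih (by simp),
          PySem.Chars.join_cons_cons]
      simp [List.append_assoc]

theorem pvTerm_ne_nil (i : Int) : pvTerm i ≠ [] := by
  simp [pvTerm]

theorem join_map_term_ne_nil (l : List Int) (h : l ≠ []) :
    PySem.Chars.join " or ".toList (l.map pvTerm) ≠ [] := by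
  cases l with
  | nil => exact absurd rfl h
  | cons a as =>
    cases as with
    | nil => simpa [PySem.Chars.join_singleton] using pvTerm_ne_nil a
    | cons b bs =>
      rw [List.map_cons, List.map_cons, PySem.Chars.join_cons_cons]
      simp [pvTerm]

theorem pvP_zero : pvP 0 = [] := by
  simp [pvP, PySem.List.pyRange_one_eq_nil, PySem.Chars.join_nil]

theorem pvS_self (n : Int) : pvS n n = [] := by
  simp [pvS, PySem.List.pyRange_one_eq_nil, PySem.Chars.join_nil]

theorem pvP_ne_nil (i : Int) (h : 0 < i) : pvP i ≠ [] := by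
  apply join_map_term_ne_nil
  simp [PySem.List.pyRange_one_cons h]

theorem pvS_ne_nil (n i : Int) (h : i < n) : pvS n i ≠ [] := by
  apply join_map_term_ne_nil
  simp [PySem.List.pyRange_one_cons h]

-- characterisation of B's first pass: pre = [pvP 0, …, pvP n]
theorem pre_eq (n : Int) (hn : 0 ≤ n) :
    (PySem.List.pyRange 0 n 1).foldl (fun acc i =>
      acc ++ [if i == 0 then "PC".toList ++ PySem.Int.toChars i ++ ".critical".toList
              else acc.getLast! ++ " or ".toList ++ ("PC".toList ++ PySem.Int.toChars i ++ ".critical".toList)]) [[]]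
    = (PySem.List.pyRange 0 (n + 1) 1).map pvP := by
  induction n, hn using Int.le_induction with
  | base =>
    rw [PySem.List.pyRange_one_eq_nil (le_refl 0),
        show PySem.List.pyRange 0 (0 + 1) 1 = [0] by decide]
    simp [pvP_zero]
  | succ n hn ih =>
    rw [PySem.List.pyRange_one_succ_right hn, List.foldl_append, ih,
        PySem.List.pyRange_one_succ_right (by omega : (0:Int) ≤ n + 1)]
    simp only [List.foldl_cons, List.foldl_nil, List.map_append, List.map_cons, List.map_nil]
    congr 1
    by_cases h0 : n = 0
    · subst h0
      unfold pvP
      rw [show PySem.List.pyRange 0 (0 + 1) 1 = [0] by decide]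
      simp [PySem.Chars.join_singleton, pvTerm]
    · have hpos : 0 < n := lt_of_le_of_ne hn (Ne.symm h0)
      have hne : (n == (0:Int)) = false := by simp [h0]
      have hlast : ((PySem.List.pyRange 0 (n + 1) 1).map pvP).getLast! = pvP n := by
        rw [PySem.List.pyRange_one_succ_right hn, List.map_append]
        simp
      rw [hne]
      simp only [Bool.false_eq_true, if_false, hlast]
      have : pvP (n + 1) = pvP n ++ " or ".toList ++ pvTerm n := by
        unfold pvP
        rw [PySem.List.pyRange_one_succ_right hn, List.map_append, List.map_singleton,
            join_append _ _ _ (by simp [PySem.List.pyRange_one_cons hpos]) (by simp),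
            PySem.Chars.join_singleton]
      rw [this]
      simp [pvTerm]

-- characterisation of B's countdown pass, generalised over the remaining iterations
theorem suf_fold (n : Int) (k : Nat) (hk : (k : Int) ≤ n) :
    ∀ acc : List (List Char), acc ≠ [] → acc.getLast! = pvS n k →
    (PySem.List.pyRange ((k : Int) - 1) (-1) (-1)).foldl (fun acc i =>
      acc ++ [if i == n - 1 then "PC".toList ++ PySem.Int.toChars i ++ ".critical".toList
              else ("PC".toList ++ PySem.Int.toChars i ++ ".critical".toList) ++ " or ".toList ++ acc.getLast!]) acc
    = acc ++ ((PySem.List.pyRange 0 (k : Int) 1).map (pvS n)).reverse := by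
  induction k with
  | zero =>
    intro acc _ _
    simp [PySem.List.pyRange_one_eq_nil]
  | succ k ih =>
    intro acc hne hlast
    have hcast : ((k + 1 : Nat) : Int) - 1 = (k : Int) := by push_cast; omega
    rw [hcast, PySem.List.pyRange_neg_one_cons (by omega : (-1:Int) < k), List.foldl_cons]
    have hstep : acc ++ [if (k : Int) == n - 1 then "PC".toList ++ PySem.Int.toChars k ++ ".critical".toList
                 else ("PC".toList ++ PySem.Int.toChars k ++ ".critical".toList) ++ " or ".toList ++ acc.getLast!]
                 = acc ++ [pvS n k] := by
      congr 1
      by_cases hk1 : (k : Int) = n - 1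
      · have : pvS n k = pvTerm k := by
          unfold pvS
          rw [hk1]
          have : PySem.List.pyRange (n-1) n 1 = [n-1] := by
            have := PySem.List.pyRange_one_singleton (a := n - 1)
            simpa [(by omega : n - 1 + 1 = n)] using this
          rw [this]
          simp [PySem.Chars.join_singleton]
        have hbeq : ((k : Int) == n - 1) = true := by simp [hk1]
        rw [hbeq, if_pos rfl, this]
        simp [pvTerm]
      · have hlt : (k : Int) < n - 1 := by push_cast at hk; omega
        have hne2 : ((k : Int) == n - 1) = false := by simp [hk1]
        rw [hne2]
        simp only [Bool.false_eq_true, if_false, hlast]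
        have : pvS n k = pvTerm k ++ " or ".toList ++ pvS n (k + 1) := by
          unfold pvS
          rw [PySem.List.pyRange_one_cons (by omega : (k:Int) < n), List.map_cons,
              join_cons _ _ _ (by simp [PySem.List.pyRange_one_cons (by omega : (k:Int) + 1 < n)])]
        rw [this]
        simp [pvTerm]
    rw [hstep]
    rw [ih (by omega) (acc ++ [pvS n ↑k]) (by simp) (by simp)]
    push_cast
    rw [PySem.List.pyRange_one_succ_right (by omega : (0:Int) ≤ (k:Int)), List.map_append]
    simp [List.append_assoc]

-- the zip of B's two tables, with its enumeration, is the per-index pair list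
theorem zip_pre_suf (n : Int) :
    List.zip ((PySem.List.pyRange 0 (n + 1) 1).map pvP)
             ((PySem.List.pyRange 1 (n + 1) 1).map (pvS n))
    = (PySem.List.pyRange 0 n 1).map (fun i => (pvP i, pvS n (i + 1))) := by
  apply List.ext_getElem
  · simp [PySem.List.length_pyRange_one]
  · intro k h1 h2
    simp only [List.getElem_zip, List.getElem_map, PySem.List.getElem_pyRange_one]
    congr 2
    omega

theorem enumerate_map_pyRange {α : Type} (n : Int) (f : Int → α) :
    PySem.List.enumerate ((PySem.List.pyRange 0 n 1).map f) 0
    = (PySem.List.pyRange 0 n 1).map (fun i => (i, f i)) := by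
  apply List.ext_getElem
  · simp [PySem.List.length_enumerate]
  · intro k h1 h2
    rw [PySem.List.getElem_enumerate]
    simp [PySem.List.getElem_pyRange_one]

-- the filtered index list of A is the prefix ++ suffix decomposition
theorem filter_ne_pyRange (n i0 : Int) (h0 : 0 ≤ i0) (h1 : i0 < n) :
    (PySem.List.pyRange 0 n 1).filter (fun i1 => i1 != i0)
      = PySem.List.pyRange 0 i0 1 ++ PySem.List.pyRange (i0 + 1) n 1 := by
  rw [PySem.List.pyRange_one_append 0 i0 n h0 (le_of_lt h1),
      PySem.List.pyRange_one_cons h1, List.filter_append]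
  congr 1
  · apply List.filter_eq_self.mpr
    intro x hx
    have := (PySem.List.mem_pyRange_one).mp hx
    simp only [bne_iff_ne, ne_eq]
    omega
  · rw [List.filter_cons_of_neg (by simp)]
    apply List.filter_eq_self.mpr
    intro x hx
    have := (PySem.List.mem_pyRange_one).mp hx
    simp only [bne_iff_ne, ne_eq]
    omega

-- A's inner join for index i0 equals B's glued prefix/suffix joins
theorem inner_eq (n i0 : Int) (h0 : 0 ≤ i0) (h1 : i0 < n) :
    PySem.Chars.join " or ".toList
      (((PySem.List.pyRange 0 n 1).filter (fun i1 => i1 != i0)).map pvTerm)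
    = (if !(pvP i0).isEmpty && !(pvS n (i0 + 1)).isEmpty
       then pvP i0 ++ " or ".toList ++ pvS n (i0 + 1) else pvP i0 ++ pvS n (i0 + 1)) := by
  rw [filter_ne_pyRange n i0 h0 h1, List.map_append]
  by_cases hz : i0 = 0
  · subst hz
    simp only [pvP_zero, List.isEmpty_nil, Bool.not_true, Bool.false_and,
               Bool.false_eq_true, if_false, List.nil_append]
    rw [PySem.List.pyRange_one_eq_nil (by omega : (0:Int) ≤ 0), List.map_nil, List.nil_append]
    rfl
  · have hp : 0 < i0 := lt_of_le_of_ne h0 (Ne.symm hz)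
    by_cases hlast : i0 = n - 1
    · have hs : pvS n (i0 + 1) = [] := by rw [hlast, (by omega : n - 1 + 1 = n)]; exact pvS_self n
      rw [hs]
      simp only [List.isEmpty_nil, Bool.not_true, Bool.and_false, Bool.false_eq_true,
                 if_false, List.append_nil]
      rw [show PySem.List.pyRange (i0 + 1) n 1 = [] from
            PySem.List.pyRange_one_eq_nil (by omega), List.map_nil, List.append_nil]
      rfl
    · have hlt : i0 + 1 < n := by omega
      have hPne : pvP i0 ≠ [] := pvP_ne_nil i0 hp
      have hSne : pvS n (i0 + 1) ≠ [] := pvS_ne_nil n (i0 + 1) hlt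
      rw [join_append _ _ _ (by simp [PySem.List.pyRange_one_cons (by omega : (0:Int) < i0)])
            (by simp [PySem.List.pyRange_one_cons hlt])]
      have hb : (!(pvP i0).isEmpty && !(pvS n (i0 + 1)).isEmpty) = true := by
        simp [hPne, hSne]
      rw [hb]
      rfl

-- both clause lists coincide
theorem clause_lists_eq (n : Int) :
    (PySem.List.pyRange 0 n 1).foldl (fun acc i0 =>
      acc ++ ["(PC".toList ++ PySem.Int.toChars i0 ++ ".critical imply not (".toList
        ++ PySem.Chars.join " or ".toList
            (((PySem.List.pyRange 0 n 1).filter (fun i1 => i1 != i0)).map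
              (fun i1 => "PC".toList ++ PySem.Int.toChars i1 ++ ".critical".toList))
        ++ "))".toList]) []
    = ((PySem.List.pyRange 0 n 1).map (fun i => (i, (pvP i, pvS n (i + 1))))).foldl
        (fun acc p =>
          acc ++ ["(PC".toList ++ PySem.Int.toChars p.1 ++ ".critical imply not (".toList
            ++ (if !p.2.1.isEmpty && !p.2.2.isEmpty
                then p.2.1 ++ " or ".toList ++ p.2.2 else p.2.1 ++ p.2.2)
            ++ "))".toList]) [] := by
  rw [PySem.List.foldl_append_singleton_eq_map, PySem.List.foldl_append_singleton_eq_map,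
      List.nil_append, List.nil_append, List.map_map]
  apply List.map_congr_left
  intro i0 hi0
  have h := (PySem.List.mem_pyRange_one).mp hi0
  simp only [Function.comp]
  congr 2
  exact inner_eq n i0 h.1 h.2

-- ===== VERDICT (by name: the statement is the Claim_ definition above) =====
theorem instantiate_property_py_spec : Claim_equal_instantiate_property_py := by
  intro template proc_num _ _
  unfold Spec_instantiate_property_py instantiate_property_py instantiate_property_py_alt
  by_cases hn : 0 ≤ proc_num
  · have hpre := pre_eq proc_num hn
    have hsuf := suf_fold proc_num proc_num.toNat (by omega) [[]] (by simp)
      (by rw [show ([([] : List Char)]).getLast! = [] from rfl,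
              show ((proc_num.toNat : Int)) = proc_num by omega, pvS_self])
    rw [show ((proc_num.toNat : Int)) = proc_num by omega] at hsuf
    simp only [hpre, hsuf]
    have hsufrev : (([([] : List Char)] ++ ((PySem.List.pyRange 0 proc_num 1).map (pvS proc_num)).reverse)).reverse
        = (PySem.List.pyRange 0 (proc_num + 1) 1).map (pvS proc_num) := by
      rw [List.reverse_append, List.reverse_reverse, List.reverse_singleton,
          PySem.List.pyRange_one_succ_right hn, List.map_append]
      simp [pvS_self]
    rw [hsufrev, PySem.List.slice_from _ (by omega : (0:Int) ≤ 1)]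
    have hdrop : ((PySem.List.pyRange 0 (proc_num + 1) 1).map (pvS proc_num)).drop (1:Int).toNat
        = (PySem.List.pyRange 1 (proc_num + 1) 1).map (pvS proc_num) := by
      rw [PySem.List.pyRange_one_cons (by omega : (0:Int) < proc_num + 1)]
      simp
    rw [hdrop, zip_pre_suf proc_num,
        enumerate_map_pyRange proc_num _, clause_lists_eq proc_num]
  · have he : PySem.List.pyRange 0 proc_num 1 = [] :=
      PySem.List.pyRange_one_eq_nil (by omega)
    have he2 : PySem.List.pyRange (proc_num - 1) (-1) (-1) = [] :=
      PySem.List.pyRange_neg_one_eq_nil (by omega)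
    simp [he, he2, PySem.List.slice_from]
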